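-- pv_equiv track=rewrite | github.com/Natneam/competitive-programming | a2sv camp problems contests and more/Contests/A2SV - Africa to Silicon Valley - Fall Camp 2021 Observation Contest 1/C. Party.py | solve
-- ===== SOURCE A (Python) =====
-- def dfs(start, graph, visited):
--     if start in visited:
--         return 0
--     maximum = 0
--     for i in graph[start]:
--         maximum = max(maximum, dfs(i, graph, visited) + 1)
--         visited.add(i)
--
--     return maximum
--
-- def solve(n, graph, parent_nodes):
--     visited = set()
--     maximum = 0
--     for i in parent_nodes:
--         if i not in visited:
--             maximum = max(maximum, dfs(i, graph, visited) + 1)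
--             visited.add(i)
--     return maximum
-- ===== SOURCE B (Python) =====
-- def solve(n, graph, parent_nodes):
--     # Iterative DFS with an explicit stack of [node, remaining_children, running_max]
--     # frames instead of recursion; same result (return value only; no argument is mutated).
--     visited = set()
--     best = 0
--     for r in parent_nodes:
--         if r in visited:
--             continue
--         stack = [[r, list(graph[r]), 0]]
--         while stack:
--             top = stack[-1]
--             if top[1]:
--                 i = top[1].pop(0)
--                 if i in visited:
--                     top[2] = max(top[2], 1)
--                     visited.add(i)
--                 else:
--                     stack.append([i, list(graph[i]), 0])
--             else:
--                 stack.pop()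
--                 node, _, m = top
--                 if stack:
--                     stack[-1][2] = max(stack[-1][2], m + 1)
--                 else:
--                     best = max(best, m + 1)
--                 visited.add(node)
--     return best
-- ===== Notes on version B (the rewrite author's own statement) =====
-- stated objective: alternative
-- what changed: A's recursive dfs is replaced by a single iterative traversal driven by an explicit stack of (node, remaining-children, running-max) frames, reproducing A's entry-time membership check and post-order visited.add timing.
import Mathlib
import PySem

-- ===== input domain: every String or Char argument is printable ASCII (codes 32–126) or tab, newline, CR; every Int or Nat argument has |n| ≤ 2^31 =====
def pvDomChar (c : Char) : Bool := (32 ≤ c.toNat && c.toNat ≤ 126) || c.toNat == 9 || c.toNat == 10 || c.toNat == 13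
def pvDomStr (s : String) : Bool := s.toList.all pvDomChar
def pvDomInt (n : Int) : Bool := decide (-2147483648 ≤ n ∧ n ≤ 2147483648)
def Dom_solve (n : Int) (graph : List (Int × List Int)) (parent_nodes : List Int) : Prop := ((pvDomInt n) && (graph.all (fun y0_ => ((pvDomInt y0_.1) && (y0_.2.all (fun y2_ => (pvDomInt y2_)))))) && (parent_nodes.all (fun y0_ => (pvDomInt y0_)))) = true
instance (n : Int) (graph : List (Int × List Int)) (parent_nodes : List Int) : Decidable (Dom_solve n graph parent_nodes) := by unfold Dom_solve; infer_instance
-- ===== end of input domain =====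

-- B replaces A's recursive DFS by a single iterative traversal over an explicit stack of
-- (node, remaining-children, running-max) frames; same return value (objective: alternative).

-- ===== PORT A =====
-- `graph[start]` (first-match dict lookup); a missing key is a Python KeyError, excluded by Pre_solve
def childrenOf (graph : List (Int × List Int)) (v : Int) : List Int :=
  (PySem.Dict.get? (PySem.Dict.mk graph) v).getD []

-- dfs of A, with the mutated set `visited` threaded through and returned.
-- The Nat fuel is a totality guard only (Python recursion has none): under Pre_solve the
-- call chain visits distinct keys, so the fuel graph.length + 2 passed by `solve` never runs out.
def dfsA (graph : List (Int × List Int)) : Nat → Int → PySem.Set Int → Int × PySem.Set Int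
  | 0, _, visited => (0, visited)            -- fuel guard; unreachable under Pre_solve
  | Nat.succ f, start, visited =>
    if PySem.Set.contains visited start then (0, visited)
    else
      (childrenOf graph start).foldl
        (fun acc i =>
          let r := dfsA graph f i acc.2
          (max acc.1 (r.1 + 1), PySem.Set.add r.2 i))
        (0, visited)

def solve (n : Int) (graph : List (Int × List Int)) (parent_nodes : List Int) : Int :=
  (parent_nodes.foldl
    (fun acc i =>
      if PySem.Set.contains acc.2 i then acc
      else
        let r := dfsA graph (graph.length + 2) i acc.2
        (max acc.1 (r.1 + 1), PySem.Set.add r.2 i))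
    ((0 : Int), PySem.Set.empty)).1

-- ===== PORT B =====
-- helpers for the termination measure of the stack loop (Lean only; the Python loop has none)
def maxDeg : List (Int × List Int) → Nat
  | [] => 0
  | p :: rest => max p.2.length (maxDeg rest)

def frameW (C : Nat) (fr : Nat × Int × List Int × Int) : Nat := C ^ fr.1 * (fr.2.2.1.length + 1)

def stackW (C : Nat) (st : List (Nat × Int × List Int × Int)) : Nat := (st.map (frameW C)).sum

theorem childrenOf_length_le (graph : List (Int × List Int)) (v : Int) :
    (childrenOf graph v).length ≤ maxDeg graph := by
  induction graph with
  | nil => simp [childrenOf, PySem.Dict.get?]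
  | cons p rest ih =>
    obtain ⟨k, cs⟩ := p
    by_cases h : k = v
    · simp [childrenOf, PySem.Dict.get?_mk_cons, h, maxDeg]
    · have : childrenOf ((k, cs) :: rest) v = childrenOf rest v := by
        simp [childrenOf, PySem.Dict.get?_mk_cons, h]
      rw [this]; exact le_trans ih (by simp [maxDeg])

-- the Python `while stack:` loop; a frame is (fuel, node, remaining children, running max).
-- The Nat fuel in each frame is a totality guard only, aligned with dfsA's.
def runStack (graph : List (Int × List Int)) :
    List (Nat × Int × List Int × Int) → PySem.Set Int → Int → Int × PySem.Set Int
  | [], visited, best => (best, visited)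
  | (cf, v, [], m) :: rest, visited, best =>
    match rest with
    | [] => (max best (m + 1), PySem.Set.add visited v)
    | (pcf, p, pcs, pm) :: rest' =>
        runStack graph ((pcf, p, pcs, max pm (m + 1)) :: rest') (PySem.Set.add visited v) best
  | (0, v, i :: cs, m) :: rest, visited, best =>
    -- fuel exhausted: guard aligned with dfsA's fuel guard; unreachable under Pre_solve
    runStack graph ((0, v, cs, max m 1) :: rest) (PySem.Set.add visited i) best
  | (Nat.succ cf', v, i :: cs, m) :: rest, visited, best =>
    if PySem.Set.contains visited i then
      runStack graph ((Nat.succ cf', v, cs, max m 1) :: rest) (PySem.Set.add visited i) best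
    else
      runStack graph ((cf', i, childrenOf graph i, 0) :: (Nat.succ cf', v, cs, m) :: rest)
        visited best
  termination_by st _ _ => stackW (maxDeg graph + 2) st
  decreasing_by
  · simp only [stackW, frameW, List.map_cons, List.sum_cons, List.length_nil]
    have h1 : 0 < (maxDeg graph + 2) ^ cf := Nat.pow_pos (by omega)
    omega
  · simp only [stackW, frameW, List.map_cons, List.sum_cons, List.length_cons, pow_zero,
      one_mul]
    omega
  · simp only [stackW, frameW, List.map_cons, List.sum_cons, List.length_cons,
      Nat.succ_eq_add_one]
    have h2 : (maxDeg graph + 2) ^ (cf' + 1) * (cs.length + 1 + 1) =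
        (maxDeg graph + 2) ^ (cf' + 1) * (cs.length + 1) + (maxDeg graph + 2) ^ (cf' + 1) :=
      Nat.mul_succ _ _
    have h1 : 0 < (maxDeg graph + 2) ^ (cf' + 1) := Nat.pow_pos (by omega)
    omega
  · simp only [stackW, frameW, List.map_cons, List.sum_cons, List.length_cons,
      Nat.succ_eq_add_one]
    have hA : (maxDeg graph + 2) ^ cf' * ((childrenOf graph i).length + 1) <
        (maxDeg graph + 2) ^ (cf' + 1) := by
      rw [pow_succ]
      refine Nat.mul_lt_mul_of_le_of_lt (le_refl _) ?_ (Nat.pow_pos (by omega))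
      have := childrenOf_length_le graph i
      omega
    have hB : (maxDeg graph + 2) ^ (cf' + 1) * (cs.length + 1 + 1) =
        (maxDeg graph + 2) ^ (cf' + 1) * (cs.length + 1) + (maxDeg graph + 2) ^ (cf' + 1) :=
      Nat.mul_succ _ _
    omega

def solve_alt (n : Int) (graph : List (Int × List Int)) (parent_nodes : List Int) : Int :=
  (parent_nodes.foldl
    (fun acc r =>
      if PySem.Set.contains acc.2 r then acc
      else runStack graph [(graph.length + 1, r, childrenOf graph r, 0)] acc.2 acc.1)
    ((0 : Int), PySem.Set.empty)).1

-- ===== PRECONDITION & SPEC =====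
-- closure of `start` under the child relation, iterated enough times to saturate
def reachN (graph : List (Int × List Int)) : Nat → PySem.Set Int → PySem.Set Int
  | 0, s => s
  | Nat.succ k, s => reachN graph k (PySem.Set.update s (s.flatMap (childrenOf graph)))

def reachFrom (graph : List (Int × List Int)) (start : List Int) : List Int :=
  reachN graph (graph.length + start.length + (graph.flatMap (fun p => p.2)).length + 1)
    (PySem.Set.ofList start)

-- Pre_solve = exactly the inputs where Python A returns: every node reachable from
-- parent_nodes is looked up, so it must be a key of graph (else KeyError), and no cycle may
-- be reachable (A's post-order visited.add lets a reachable cycle recurse forever: RecursionError).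
def Pre_solve (n : Int) (graph : List (Int × List Int)) (parent_nodes : List Int) : Prop :=
  ∀ v ∈ reachFrom graph parent_nodes,
    (PySem.Dict.get? (PySem.Dict.mk graph) v).isSome = true ∧
      v ∉ reachFrom graph (childrenOf graph v)

instance (n : Int) (graph : List (Int × List Int)) (parent_nodes : List Int) : Decidable (Pre_solve n graph parent_nodes) := by unfold Pre_solve; infer_instance

def pvWitness_solve : Int × (List (Int × List Int)) × List Int := (2, [(0, [1]), (1, [])], [0])

def Spec_solve (n : Int) (graph : List (Int × List Int)) (parent_nodes : List Int) (out : Int) : Prop := out = solve_alt n graph parent_nodes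
instance (n : Int) (graph : List (Int × List Int)) (parent_nodes : List Int) (out : Int) : Decidable (Spec_solve n graph parent_nodes out) := by unfold Spec_solve; infer_instance

-- ===== CLAIM (what is proved, stated in full; the proofs are below) =====
def Claim_equal_solve : Prop := ∀ (n : Int) (graph : List (Int × List Int)) (parent_nodes : List Int), Dom_solve n graph parent_nodes → Pre_solve n graph parent_nodes → Spec_solve n graph parent_nodes (solve n graph parent_nodes)

-- ===== LEMMAS AND PROOFS =====

-- A's for-loop over the children of one frame, starting from accumulator (m, vis)
def dfsFold (graph : List (Int × List Int)) (f : Nat) (cs : List Int) (acc : Int × PySem.Set Int) :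
    Int × PySem.Set Int :=
  cs.foldl
    (fun acc i =>
      let r := dfsA graph f i acc.2
      (max acc.1 (r.1 + 1), PySem.Set.add r.2 i)) acc

theorem dfsA_succ (graph : List (Int × List Int)) (f : Nat) (start : Int) (vis : PySem.Set Int) :
    dfsA graph (Nat.succ f) start vis =
      if PySem.Set.contains vis start then (0, vis)
      else dfsFold graph f (childrenOf graph start) (0, vis) := rfl

-- simulation: running the machine on a frame (cf, v, cs, m) first performs exactly A's
-- child loop dfsFold, then continues with the exhausted frame
theorem dfsFold_cons (graph : List (Int × List Int)) (f : Nat) (i : Int) (cs : List Int)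
    (m : Int) (vis : PySem.Set Int) :
    dfsFold graph f (i :: cs) (m, vis) =
      dfsFold graph f cs
        (max m ((dfsA graph f i vis).1 + 1), PySem.Set.add (dfsA graph f i vis).2 i) := rfl

-- simulation: running the machine on a frame (cf, v, cs, m) first performs exactly A's
-- child loop dfsFold, then continues with the exhausted frame
theorem runStack_frame (graph : List (Int × List Int)) :
    ∀ (cf : Nat) (cs : List Int) (m : Int) (vis : PySem.Set Int) (v : Int)
      (rest : List (Nat × Int × List Int × Int)) (best : Int),
      runStack graph ((cf, v, cs, m) :: rest) vis best =
        runStack graph ((cf, v, [], (dfsFold graph cf cs (m, vis)).1) :: rest)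
          (dfsFold graph cf cs (m, vis)).2 best := by
  intro cf
  induction cf with
  | zero =>
    intro cs
    induction cs with
    | nil => intro m vis v rest best; rfl
    | cons i cs ih =>
      intro m vis v rest best
      rw [runStack, ih, dfsFold_cons]
      norm_num [dfsA]
  | succ cf' ihcf =>
    intro cs
    induction cs with
    | nil => intro m vis v rest best; rfl
    | cons i cs ih =>
      intro m vis v rest best
      by_cases h : PySem.Set.contains vis i = true
      · have hd : dfsA graph (Nat.succ cf') i vis = (0, vis) := by
          rw [dfsA_succ, if_pos h]
        rw [runStack, if_pos h, ih, dfsFold_cons, hd]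
        norm_num
      · have hd : dfsA graph (Nat.succ cf') i vis =
            dfsFold graph cf' (childrenOf graph i) (0, vis) := by
          rw [dfsA_succ, if_neg h]
        rw [runStack, if_neg h,
          ihcf (childrenOf graph i) 0 vis i ((Nat.succ cf', v, cs, m) :: rest) best,
          runStack, ih, dfsFold_cons, hd]

theorem solve_foldl_eq (graph : List (Int × List Int)) :
    ∀ (roots : List Int) (acc : Int × PySem.Set Int),
      roots.foldl
        (fun acc i =>
          if PySem.Set.contains acc.2 i then acc
          else
            let r := dfsA graph (graph.length + 2) i acc.2
            (max acc.1 (r.1 + 1), PySem.Set.add r.2 i)) acc =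
      roots.foldl
        (fun acc r =>
          if PySem.Set.contains acc.2 r then acc
          else runStack graph [(graph.length + 1, r, childrenOf graph r, 0)] acc.2 acc.1) acc := by
  intro roots
  induction roots with
  | nil => intro acc; rfl
  | cons r rs ih =>
    intro acc
    simp only [List.foldl_cons]
    by_cases h : PySem.Set.contains acc.2 r = true
    · simp only [h, if_true]; exact ih acc
    · simp only [h, Bool.false_eq_true, if_false]
      have hd : dfsA graph (graph.length + 2) r acc.2 =
          dfsFold graph (graph.length + 1) (childrenOf graph r) (0, acc.2) := by
        show dfsA graph (Nat.succ (graph.length + 1)) r acc.2 = _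
        rw [dfsA_succ, if_neg h]
      rw [runStack_frame graph (graph.length + 1) (childrenOf graph r) 0 acc.2 r [] acc.1,
        runStack, ih, hd]

theorem solve_eq_alt (n : Int) (graph : List (Int × List Int)) (parent_nodes : List Int) :
    solve n graph parent_nodes = solve_alt n graph parent_nodes := by
  unfold solve solve_alt
  rw [solve_foldl_eq]

-- ===== VERDICT (by name: the statement is the Claim_ definition above) =====
theorem solve_spec : Claim_equal_solve := by
  intro n graph parent_nodes _ _
  unfold Spec_solve
  exact solve_eq_alt n graph parent_nodes
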